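-- pv_equiv track=rewrite | github.com/alexcodes/news-aggregator | image/image_generator.py | get_max_word_length
-- ===== SOURCE A (Python) =====
-- def get_max_word_length(text):
--     if not text:
--         return 0
--
--     max_length = 0
--     for word in text.split(" "):
--         length = len(word)
--         if length > max_length:
--             max_length = length
--
--     return max_length
-- ===== SOURCE B (Python) =====
-- def get_max_word_length(text):
--     # Single character-level pass: no split list is built.
--     if not text:
--         return 0
--     current = 0
--     max_length = 0
--     for ch in text:
--         if ch == " ":
--             current = 0
--         else:
--             current += 1
--             if current > max_length:
--                 max_length = current
--     return max_length
-- ===== Notes on version B (the rewrite author's own statement) =====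
-- stated objective: alternative
-- what changed: Replaces split-into-words-then-max with a single character scan maintaining a current run length and running maximum, never materialising the split list.
import Mathlib
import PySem

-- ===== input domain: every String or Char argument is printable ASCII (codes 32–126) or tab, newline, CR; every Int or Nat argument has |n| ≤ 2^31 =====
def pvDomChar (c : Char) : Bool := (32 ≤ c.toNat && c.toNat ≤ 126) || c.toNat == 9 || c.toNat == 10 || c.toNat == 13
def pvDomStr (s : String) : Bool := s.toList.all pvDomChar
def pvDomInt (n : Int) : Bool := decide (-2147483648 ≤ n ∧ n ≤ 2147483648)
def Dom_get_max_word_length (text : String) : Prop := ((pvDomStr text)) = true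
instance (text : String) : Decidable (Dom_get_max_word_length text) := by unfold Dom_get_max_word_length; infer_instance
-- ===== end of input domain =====

-- B replaces A's split-into-words-then-max by a single character scan keeping a current
-- run length and running maximum (alternative decomposition, same O(n) cost).


-- ===== PORT A =====
-- Python: if not text: return 0; loop over text.split(" ") keeping the running max length.
def get_max_word_length (text : String) : Int :=
  if text = "" then 0
  else
    (PySem.Chars.splitOn text.toList [' ']).foldl
      (fun max_length word =>
        let length : Int := word.length
        if length > max_length then length else max_length) 0

-- ===== PORT B =====
-- Source B: single pass over the characters with (current, max_length) state.
def get_max_word_length_alt (text : String) : Int :=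
  if text = "" then 0
  else
    (text.toList.foldl
      (fun (st : Int × Int) ch =>
        if ch = ' ' then (0, st.2)
        else
          let current := st.1 + 1
          (current, if current > st.2 then current else st.2)) (0, 0)).2

-- ===== PRECONDITION & SPEC =====
def Spec_get_max_word_length (text : String) (out : Int) : Prop := out = get_max_word_length_alt text
instance (text : String) (out : Int) : Decidable (Spec_get_max_word_length text out) := by unfold Spec_get_max_word_length; infer_instance

-- ===== CLAIM (what is proved, stated in full; the proofs are below) =====
def Claim_equal_get_max_word_length : Prop := ∀ (text : String), Dom_get_max_word_length text → Spec_get_max_word_length text (get_max_word_length text)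

-- ===== LEMMAS AND PROOFS =====

-- first space-split segment and the remaining segments, structurally
def pvSplitSp : List Char → List Char × List (List Char)
  | [] => ([], [])
  | c :: cs =>
    let (h, t) := pvSplitSp cs
    if c = ' ' then ([], h :: t) else (c :: h, t)

theorem pvSplitOn_go_eq (l : List Char) : ∀ (fuel : Nat) (cur : List Char) (acc : List (List Char)),
    l.length < fuel →
    PySem.Chars.splitOn.go [' '] fuel l cur acc
      = acc.reverse ++ (cur.reverse ++ (pvSplitSp l).1) :: (pvSplitSp l).2 := by
  induction l with
  | nil =>
    intro fuel cur acc h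
    match fuel with
    | fuel + 1 => simp [PySem.Chars.splitOn.go, pvSplitSp]
  | cons c cs ih =>
    intro fuel cur acc h
    match fuel with
    | fuel + 1 =>
      by_cases hc : c = ' '
      · subst hc
        rw [show PySem.Chars.splitOn.go [' '] (fuel+1) (' ' :: cs) cur acc
            = PySem.Chars.splitOn.go [' '] fuel cs [] (cur.reverse :: acc) by
          simp [PySem.Chars.splitOn.go, List.isPrefixOf]]
        rw [ih fuel [] (cur.reverse :: acc) (by simpa using Nat.lt_of_succ_lt_succ h)]
        simp [pvSplitSp]
      · rw [show PySem.Chars.splitOn.go [' '] (fuel+1) (c :: cs) cur acc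
            = PySem.Chars.splitOn.go [' '] fuel cs (c :: cur) acc by
          simp [PySem.Chars.splitOn.go, List.isPrefixOf, Ne.symm hc]]
        rw [ih fuel (c :: cur) acc (by simpa using Nat.lt_of_succ_lt_succ h)]
        simp [pvSplitSp, hc]

theorem pvSplitOn_eq (l : List Char) :
    PySem.Chars.splitOn l [' '] = ((pvSplitSp l).1) :: (pvSplitSp l).2 := by
  rw [PySem.Chars.splitOn, pvSplitOn_go_eq l (l.length + 1) [] [] (Nat.lt_succ_self _)]
  simp

-- the char fold of B computes A's fold over the space-split segments
theorem pvScan_eq (l : List Char) : ∀ (cur mx : Int), 0 ≤ cur → cur ≤ mx →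
    (l.foldl
      (fun (st : Int × Int) ch =>
        if ch = ' ' then (0, st.2)
        else
          let current := st.1 + 1
          (current, if current > st.2 then current else st.2)) (cur, mx)).2
      = (pvSplitSp l).2.foldl
          (fun max_length word =>
            let length : Int := word.length
            if length > max_length then length else max_length)
          (if cur + ((pvSplitSp l).1.length : Int) > mx then cur + ((pvSplitSp l).1.length : Int) else mx) := by
  induction l with
  | nil =>
    intro cur mx h0 hle
    simp [pvSplitSp]
    omega
  | cons c cs ih =>
    intro cur mx h0 hle
    rw [List.foldl_cons]
    by_cases hc : c = ' '
    · subst hc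
      rw [if_pos rfl, ih 0 mx le_rfl (le_trans h0 hle)]
      rcases hsp : pvSplitSp cs with ⟨hh, t⟩
      simp only [pvSplitSp, hsp, reduceIte]
      rw [List.foldl_cons]
      congr 1
      simp only [List.length_nil, Int.natCast_zero, add_zero, zero_add]
      split_ifs <;> omega
    · rw [if_neg hc, ih (cur + 1) (if cur + 1 > mx then cur + 1 else mx) (by omega) (by split <;> omega)]
      rcases hsp : pvSplitSp cs with ⟨hh, t⟩
      simp only [pvSplitSp, hsp, if_neg hc, List.length_cons]
      congr 1
      push_cast
      split_ifs <;> omega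

-- ===== VERDICT (by name: the statement is the Claim_ definition above) =====
theorem get_max_word_length_spec : Claim_equal_get_max_word_length := by
  intro text _
  unfold Spec_get_max_word_length get_max_word_length get_max_word_length_alt
  by_cases h : text = ""
  · simp [h]
  · rw [if_neg h, if_neg h, pvSplitOn_eq, List.foldl_cons,
      pvScan_eq text.toList 0 0 le_rfl le_rfl]
    simp
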